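-- pv_equiv track=rewrite | github.com/aws-samples/s3pathlib-project | s3pathlib/utils.py | smart_join_s3_key
-- ===== SOURCE A (Python) =====
-- from typing import Tuple, List, Iterable, Optional
--
-- def split_parts(key) -> List[str]:
--     """
--     Split s3 key parts using "/" delimiter.
--
--     Example::
--
--         >>> split_parts("a/b/c")
--         ["a", "b", "c"]
--         >>> split_parts("//a//b//c//")
--         ["a", "b", "c"]
--
--     .. versionadded:: 1.0.1
--     """
--     return [part for part in key.split("/") if part]
--
-- def smart_join_s3_key(
--     parts: List[str],
--     is_dir: bool,
-- ) -> str: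
--     """
--     Note, it assume that there's no such double slack in your path. It ensure
--     that there's only one consecutive "/" in the s3 key.
--
--     :param parts: list of s3 key path parts, could have "/"
--     :param is_dir: if True, the s3 key ends with "/". otherwise enforce no
--         tailing "/".
--
--     Example::
--
--         >>> smart_join_s3_key(parts=["/a/", "b/", "/c"], is_dir=True)
--         a/b/c/
--         >>> smart_join_s3_key(parts=["/a/", "b/", "/c"], is_dir=False)
--         a/b/c
--
--     .. versionadded:: 1.0.1
--     """
--     new_parts = list()
--     for part in parts:
--         new_parts.extend(split_parts(part))
--     key = "/".join(new_parts)
--     if is_dir: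
--         return key + "/"
--     else:
--         return key
-- ===== SOURCE B (Python) =====
-- from typing import List
--
-- def smart_join_s3_key(
--     parts: List[str],
--     is_dir: bool,
-- ) -> str:
--     # Single character-level pass: a small state machine collapses runs of "/"
--     # (and part boundaries) into at most one separator, emitted lazily only
--     # between non-empty tokens; no split/join of intermediate lists.
--     out = []
--     pending = False  # a separator was seen since the last emitted character
--     for part in parts:
--         for ch in part:
--             if ch == "/":
--                 pending = True
--             else:
--                 if pending and out:
--                     out.append("/")
--                 out.append(ch)
--                 pending = False
--         pending = True  # a part boundary acts like a separator
--     key = "".join(out)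
--     if is_dir:
--         return key + "/"
--     else:
--         return key
-- ===== Notes on version B (the rewrite author's own statement) =====
-- stated objective: alternative
-- what changed: A splits each part on '/', filters empty pieces, extends an accumulator list and finally '/'-joins it; B never builds token lists at all: a single character-level pass runs a small state machine over the characters of the parts (part boundaries acting as separators), emitting non-'/' characters and lazily inserting exactly one '/' between tokens.
import Mathlib
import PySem

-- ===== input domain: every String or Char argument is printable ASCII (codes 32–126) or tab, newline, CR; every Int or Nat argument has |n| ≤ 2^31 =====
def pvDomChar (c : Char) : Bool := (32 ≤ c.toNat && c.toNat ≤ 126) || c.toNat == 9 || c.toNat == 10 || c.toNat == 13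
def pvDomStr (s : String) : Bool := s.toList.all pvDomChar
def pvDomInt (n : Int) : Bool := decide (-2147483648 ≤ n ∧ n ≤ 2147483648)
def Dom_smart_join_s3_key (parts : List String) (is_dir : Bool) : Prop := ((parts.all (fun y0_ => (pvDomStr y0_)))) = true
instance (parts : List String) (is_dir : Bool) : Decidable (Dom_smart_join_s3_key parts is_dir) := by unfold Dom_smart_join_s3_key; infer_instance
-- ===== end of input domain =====

-- B replaces A's split/filter/extend-per-part pipeline by a single character-level pass:
-- a state machine that emits non-'/' characters and lazily inserts one '/' between tokens;
-- objective: alternative (no split/join of intermediate token lists).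

-- ===== PORT A =====
-- [part for part in key.split("/") if part]  (split on a literal nonempty separator never raises)
def split_parts (key : String) : List String :=
  ((PySem.Chars.splitOn key.toList "/".toList).map String.ofList).filter (fun part => !(part == ""))

def smart_join_s3_key (parts : List String) (is_dir : Bool) : String :=
  let new_parts := parts.foldl (fun acc part => acc ++ split_parts part) ([] : List String)
  let key := PySem.Str.join "/" new_parts
  if is_dir then key ++ "/" else key

-- ===== PORT B =====
-- the per-character state machine: state = (emitted chars, "separator pending" flag)
def pvStep (st : List Char × Bool) (ch : Char) : List Char × Bool :=
  if ch = '/' then (st.1, true)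
  else (st.1 ++ (if st.2 && !st.1.isEmpty then ['/', ch] else [ch]), false)

-- one part: run the machine over its characters, then mark a pending separator (part boundary)
def pvOuter (st : List Char × Bool) (part : String) : List Char × Bool :=
  ((part.toList.foldl pvStep st).1, true)

def smart_join_s3_key_alt (parts : List String) (is_dir : Bool) : String :=
  let st := parts.foldl pvOuter (([] : List Char), false)
  let key := String.ofList st.1
  if is_dir then key ++ "/" else key

-- ===== PRECONDITION & SPEC =====
def Spec_smart_join_s3_key (parts : List String) (is_dir : Bool) (out : String) : Prop := out = smart_join_s3_key_alt parts is_dir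
instance (parts : List String) (is_dir : Bool) (out : String) : Decidable (Spec_smart_join_s3_key parts is_dir out) := by unfold Spec_smart_join_s3_key; infer_instance

-- ===== CLAIM (what is proved, stated in full; the proofs are below) =====
def Claim_equal_smart_join_s3_key : Prop := ∀ (parts : List String) (is_dir : Bool), Dom_smart_join_s3_key parts is_dir → Spec_smart_join_s3_key parts is_dir (smart_join_s3_key parts is_dir)

-- ===== LEMMAS AND PROOFS =====

-- the tokens of a char list: nonempty pieces between '/'s
def pvTok (cs : List Char) : List (List Char) := (cs.splitOn '/').filter (fun t => !t.isEmpty)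

-- glue: what follows an already-emitted nonempty prefix when the tokens L still come
def pvG (L : List (List Char)) : List Char := if L = [] then [] else '/' :: PySem.Chars.join ['/'] L

def pvFlatTok (parts : List String) : List (List Char) := parts.flatMap (fun p => pvTok p.toList)

theorem pvFlatTok_cons (p : String) (ps : List String) :
    pvFlatTok (p :: ps) = pvTok p.toList ++ pvFlatTok ps := rfl

theorem pvJ_cons (x : List Char) (L : List (List Char)) :
    PySem.Chars.join ['/'] (x :: L) = x ++ pvG L := by
  cases L with
  | nil => simp [PySem.Chars.join_singleton, pvG]
  | cons y l => rw [PySem.Chars.join_cons_cons]; simp [pvG]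

theorem pvJ_append2 (a b : List (List Char)) (ha : a ≠ []) (hb : b ≠ []) :
    PySem.Chars.join ['/'] (a ++ b) = PySem.Chars.join ['/'] a ++ '/' :: PySem.Chars.join ['/'] b := by
  induction a with
  | nil => exact absurd rfl ha
  | cons x a' ih =>
    cases a' with
    | nil =>
      rw [List.singleton_append, pvJ_cons, PySem.Chars.join_singleton, pvG, if_neg hb]
    | cons y a'' =>
      rw [List.cons_append, pvJ_cons, pvJ_cons, pvG, pvG,
          if_neg (by simp : (y :: a'') ++ b ≠ []), if_neg (by simp : (y :: a'' : List (List Char)) ≠ [])]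
      have := ih (by simp)
      rw [List.cons_append] at this ⊢
      simp [this]

theorem pvG_append (a b : List (List Char)) : pvG (a ++ b) = pvG a ++ pvG b := by
  by_cases ha : a = []
  · subst ha; simp [pvG]
  · by_cases hb : b = []
    · subst hb; simp [pvG]
    · rw [pvG, if_neg (by simp [ha]), pvJ_append2 a b ha hb, pvG, if_neg ha, pvG, if_neg hb]
      simp

theorem pvJ_append (a b : List (List Char)) (ha : a ≠ []) :
    PySem.Chars.join ['/'] (a ++ b) = PySem.Chars.join ['/'] a ++ pvG b := by
  by_cases hb : b = []
  · subst hb; simp [pvG]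
  · rw [pvJ_append2 a b ha hb, pvG, if_neg hb]

-- splitOn, one step
theorem splitOn_cons_sep (cs : List Char) : ('/' :: cs).splitOn '/' = [] :: cs.splitOn '/' := by
  show List.splitOnP (· == '/') ('/' :: cs) = [] :: List.splitOnP (· == '/') cs
  rw [List.splitOnP_cons]; simp

theorem splitOn_cons_nonsep (c : Char) (hc : ¬ c = '/') (cs : List Char) :
    (c :: cs).splitOn '/' = (c :: (cs.splitOn '/').headI) :: (cs.splitOn '/').tail := by
  show List.splitOnP (· == '/') (c :: cs) = _
  rw [List.splitOnP_cons, if_neg (by simp [hc])]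
  obtain ⟨h, t, hht⟩ := List.exists_cons_of_ne_nil (List.splitOnP_ne_nil (· == '/') cs)
  have hht' : cs.splitOn '/' = h :: t := hht
  show (List.splitOnP (· == '/') cs).modifyHead (c :: ·) = _
  rw [hht, hht']
  rfl

theorem pvTok_nil : pvTok [] = [] := by
  simp [pvTok, List.splitOn, List.splitOnP_nil]

theorem pvTok_cons_sep (cs : List Char) : pvTok ('/' :: cs) = pvTok cs := by
  simp [pvTok, splitOn_cons_sep]

theorem pvTok_cons_nonsep (c : Char) (hc : ¬ c = '/') (cs : List Char) :
    pvTok (c :: cs) = (c :: (cs.splitOn '/').headI) :: ((cs.splitOn '/').tail.filter (fun t => !t.isEmpty)) := by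
  simp [pvTok, splitOn_cons_nonsep c hc cs]

-- the inner machine, characterized
theorem inner_spec (cs : List Char) : ∀ (out : List Char) (pend : Bool),
    (cs.foldl pvStep (out, pend)).1 =
      out ++ (if pvTok cs = [] then []
              else (if out ≠ [] ∧ (pend = true ∨ cs.head? = some '/') then ['/'] else [])
                   ++ PySem.Chars.join ['/'] (pvTok cs)) := by
  induction cs with
  | nil => intro out pend; simp [pvTok_nil]
  | cons c rest ih =>
    intro out pend
    by_cases hc : c = '/'
    · subst hc
      rw [List.foldl_cons, pvStep, if_pos rfl, ih out true, pvTok_cons_sep]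
      by_cases ht : pvTok rest = []
      · simp [ht]
      · rw [if_neg ht, if_neg ht]
        by_cases hout : out = [] <;> simp [hout]
    · -- c is a regular character: it is emitted (with a '/' before it iff pending and out ≠ [])
      rw [List.foldl_cons, pvStep, if_neg hc]
      have hsplit : (if pend && !out.isEmpty then ['/', c] else [c])
          = (if out ≠ [] ∧ (pend = true ∨ (c :: rest).head? = some '/') then ['/'] else []) ++ [c] := by
        by_cases hp : pend <;> by_cases ho : out = [] <;> simp [hp, ho, hc]
      rw [hsplit]
      set sep0 := (if out ≠ [] ∧ (pend = true ∨ (c :: rest).head? = some '/') then (['/'] : List Char) else []) with hsep0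
      rw [ih (out ++ (sep0 ++ [c])) false]
      have hout' : out ++ (sep0 ++ [c]) ≠ [] := by simp
      rw [pvTok_cons_nonsep c hc rest]
      rw [if_neg (by simp : ¬((c :: (rest.splitOn '/').headI) :: ((rest.splitOn '/').tail.filter (fun t => !t.isEmpty)) = []))]
      rw [pvJ_cons]
      -- reduce to: the machine's continuation on rest equals headI-tail glue
      have key : (if pvTok rest = [] then []
              else (if out ++ (sep0 ++ [c]) ≠ [] ∧ (false = true ∨ rest.head? = some '/') then ['/'] else [])
                   ++ PySem.Chars.join ['/'] (pvTok rest))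
          = (rest.splitOn '/').headI ++ pvG ((rest.splitOn '/').tail.filter (fun t => !t.isEmpty)) := by
        cases rest with
        | nil => simp [pvTok_nil, List.splitOn, List.splitOnP_nil, pvG]
        | cons d r =>
          by_cases hd : d = '/'
          · subst hd
            rw [pvTok_cons_sep, splitOn_cons_sep]
            simp only [List.headI, List.tail]
            have htok : (r.splitOn '/').filter (fun t => !t.isEmpty) = pvTok r := rfl
            rw [htok, List.nil_append]
            by_cases ht : pvTok r = []
            · rw [if_pos ht, pvG, if_pos ht]
            · rw [if_neg ht, pvG, if_neg ht, if_pos ⟨by simp, Or.inr rfl⟩]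
              simp
          · rw [pvTok_cons_nonsep d hd r, splitOn_cons_nonsep d hd r]
            simp only [List.headI, List.tail, List.head?]
            rw [if_neg (by simp), if_neg (by simp [hd]), pvJ_cons]
            simp
      rw [key]
      simp
-- helper: every token is nonempty, so a nonempty token list joins to a nonempty string
theorem pvJ_tok_ne_nil (cs : List Char) (h : pvTok cs ≠ []) :
    PySem.Chars.join ['/'] (pvTok cs) ≠ [] := by
  obtain ⟨x, l, hx⟩ := List.exists_cons_of_ne_nil h
  have hxmem : x ∈ pvTok cs := by rw [hx]; exact List.mem_cons_self
  have hxne : ¬ x.isEmpty := by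
    have := List.of_mem_filter hxmem
    simpa using this
  rw [hx, pvJ_cons]
  cases x with
  | nil => simp at hxne
  | cons a b => simp

-- the outer loop once the output is nonempty (separator pending at each part boundary)
theorem outer_spec_ne (ps : List String) : ∀ (out : List Char), out ≠ [] →
    (ps.foldl pvOuter (out, true)).1 = out ++ pvG (pvFlatTok ps) := by
  induction ps with
  | nil => intro out _; simp [pvFlatTok, pvG]
  | cons p ps ih =>
    intro out hout
    rw [List.foldl_cons]
    have h1 : pvOuter (out, true) p = (out ++ pvG (pvTok p.toList), true) := by
      rw [pvOuter, inner_spec p.toList out true]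
      by_cases ht : pvTok p.toList = []
      · simp [ht, pvG]
      · rw [if_neg ht, if_pos ⟨hout, Or.inl rfl⟩, pvG, if_neg ht]
        simp
    rw [h1, ih _ (by simp [hout]), pvFlatTok_cons, pvG_append, List.append_assoc]

-- the outer loop from the empty output
theorem outer_spec_nil (ps : List String) : ∀ (pend : Bool),
    (ps.foldl pvOuter ([], pend)).1 = PySem.Chars.join ['/'] (pvFlatTok ps) := by
  induction ps with
  | nil => intro pend; simp [pvFlatTok, PySem.Chars.join_nil]
  | cons p ps ih =>
    intro pend
    rw [List.foldl_cons]
    have h1 : pvOuter (([] : List Char), pend) p = (PySem.Chars.join ['/'] (pvTok p.toList), true) := by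
      rw [pvOuter, inner_spec p.toList [] pend]
      by_cases ht : pvTok p.toList = []
      · simp [ht, PySem.Chars.join_nil]
      · rw [if_neg ht, if_neg (by simp)]
        simp
    rw [h1]
    by_cases ht : pvTok p.toList = []
    · rw [ht, PySem.Chars.join_nil, ih true, pvFlatTok_cons, ht, List.nil_append]
    · rw [outer_spec_ne ps _ (pvJ_tok_ne_nil p.toList ht), pvFlatTok_cons,
          pvJ_append _ _ ht]

-- ===== A-side lemmas (PySem.Chars.splitOn at a one-char separator is List.splitOn) =====
theorem pysem_splitOn_go_eq (c : Char) (fuel : Nat) (l cur : List Char) (acc : List (List Char))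
    (h : l.length < fuel) :
    PySem.Chars.splitOn.go [c] fuel l cur acc
      = acc.reverse ++ List.splitOnP.go (· == c) l cur := by
  induction fuel generalizing l cur acc with
  | zero => omega
  | succ fuel ih =>
    cases l with
    | nil => simp [PySem.Chars.splitOn.go, List.splitOnP.go]
    | cons x rest =>
      simp only [PySem.Chars.splitOn.go, List.splitOnP.go, List.isPrefixOf]
      by_cases hx : x = c
      · subst hx
        simp only [BEq.rfl, Bool.true_and, if_pos, List.length_cons] at *
        have hdrop : List.drop (([] : List Char).length + 1) (x :: rest) = rest := rfl
        rw [hdrop, ih rest [] (cur.reverse :: acc) (by simpa using Nat.lt_of_succ_lt_succ h)]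
        simp
      · have hbe : (x == c) = false := by simp [hx]
        have hbe' : (c == x) = false := by simp [Ne.symm hx]
        simp only [hbe, hbe', Bool.false_and, if_neg, Bool.false_eq_true, not_false_iff]
        exact ih rest (x :: cur) acc (by simpa using Nat.lt_of_succ_lt_succ h)

theorem pysem_splitOn_eq (c : Char) (s : List Char) :
    PySem.Chars.splitOn s [c] = s.splitOn c := by
  rw [PySem.Chars.splitOn, pysem_splitOn_go_eq c (s.length + 1) s [] [] (by omega)]
  rfl

theorem ofList_eq_empty_iff (cs : List Char) : (String.ofList cs = "") ↔ cs = [] := by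
  constructor
  · intro h
    have := congrArg String.toList h
    simpa using this
  · rintro rfl; rfl

theorem map_filter_ofList (l : List (List Char)) :
    (((l.map String.ofList).filter (fun t => !(t == ""))).map String.toList)
      = l.filter (fun cs => !cs.isEmpty) := by
  rw [List.filter_map, List.map_map]
  have hp : ((fun (t : String) => !(t == "")) ∘ String.ofList) = (fun cs => !cs.isEmpty) := by
    funext cs
    simp only [Function.comp]
    rw [Bool.eq_iff_iff]
    simp [ofList_eq_empty_iff (cs := cs)]
  rw [hp]
  have : (String.toList ∘ String.ofList) = id := by funext cs; simp
  simp [this]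

-- A's accumulated token list, as char lists, is pvFlatTok
theorem a_newparts_toList (parts : List String) :
    (parts.foldl (fun acc part => acc ++ split_parts part) []).map String.toList = pvFlatTok parts := by
  rw [PySem.List.foldl_append_eq_flatMap, List.nil_append, List.map_flatMap, pvFlatTok]
  congr 1
  funext p
  unfold split_parts
  have hsep : ("/".toList : List Char) = ['/'] := rfl
  rw [hsep, pysem_splitOn_eq, map_filter_ofList]
  rfl

-- ===== VERDICT (by name: the statement is the Claim_ definition above) =====
theorem smart_join_s3_key_spec : Claim_equal_smart_join_s3_key := by
  intro parts is_dir _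
  unfold Spec_smart_join_s3_key smart_join_s3_key smart_join_s3_key_alt
  have key_eq : PySem.Str.join "/" (parts.foldl (fun acc part => acc ++ split_parts part) [])
      = String.ofList (parts.foldl pvOuter ([], false)).1 := by
    rw [outer_spec_nil parts false]
    have h1 : (PySem.Str.join "/" (parts.foldl (fun acc part => acc ++ split_parts part) [])).toList
        = PySem.Chars.join ['/'] (pvFlatTok parts) := by
      have hsep : ("/".toList : List Char) = ['/'] := rfl
      rw [PySem.Str.toList_join, hsep, a_newparts_toList]
    calc PySem.Str.join "/" (parts.foldl (fun acc part => acc ++ split_parts part) [])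
        = String.ofList (PySem.Str.join "/" (parts.foldl (fun acc part => acc ++ split_parts part) [])).toList := String.ofList_toList.symm
      _ = String.ofList (PySem.Chars.join ['/'] (pvFlatTok parts)) := by rw [h1]
  cases is_dir <;> simp only [if_true, if_false, Bool.false_eq_true, key_eq]
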